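-- pv_equiv track=rewrite | github.com/Adhvyth-T/Stock-Analysis-Agent | orchestrator/portfolio_workflow.py | _categorize_actions
-- ===== SOURCE A (Python) =====
-- from typing import Dict, Any, List, Optional
--
-- class PortfolioAction:
--     """Portfolio action recommendations."""
--     HOLD = "HOLD"
--     ADD_MORE = "ADD_MORE"
--     BOOK_PARTIAL_25 = "BOOK_PARTIAL_25"
--     BOOK_PARTIAL_50 = "BOOK_PARTIAL_50"
--     BOOK_ALL = "BOOK_ALL"
--     STOP_LOSS_HIT = "STOP_LOSS_HIT"
--     REBALANCE = "REBALANCE"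
--     TRAILING_STOP = "TRAILING_STOP"
--
-- def _categorize_actions(analyses: List[Dict]) -> Dict[str, List[str]]:
--     """Categorize stocks by recommended action."""
--     categories = {
--         PortfolioAction.HOLD: [],
--         PortfolioAction.ADD_MORE: [],
--         PortfolioAction.BOOK_PARTIAL_25: [],
--         PortfolioAction.BOOK_PARTIAL_50: [],
--         PortfolioAction.BOOK_ALL: [],
--         PortfolioAction.STOP_LOSS_HIT: [],
--         PortfolioAction.TRAILING_STOP: [],
--     }
--
--     for analysis in analyses:
--         action = analysis.get("action", PortfolioAction.HOLD)
--         ticker = analysis.get("ticker", "Unknown")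
--         if action in categories:
--             categories[action].append(ticker)
--
--     return categories
-- ===== SOURCE B (Python) =====
-- def _categorize_actions(analyses):
--     """Categorize stocks by recommended action: one filtering pass per fixed category."""
--     cats = ("HOLD", "ADD_MORE", "BOOK_PARTIAL_25", "BOOK_PARTIAL_50",
--             "BOOK_ALL", "STOP_LOSS_HIT", "TRAILING_STOP")
--     return {cat: [a.get("ticker", "Unknown") for a in analyses
--                   if a.get("action", "HOLD") == cat]
--             for cat in cats}
-- ===== Notes on version B (the rewrite author's own statement) =====
-- stated objective: alternative
-- what changed: Instead of one dispatch pass that appends each analysis into a pre-built mutable bucket dict, B builds the result with an outer loop over the seven fixed categories, filtering the analyses once per category (same defaults action=HOLD, ticker=Unknown, same key set).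
import Mathlib
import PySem

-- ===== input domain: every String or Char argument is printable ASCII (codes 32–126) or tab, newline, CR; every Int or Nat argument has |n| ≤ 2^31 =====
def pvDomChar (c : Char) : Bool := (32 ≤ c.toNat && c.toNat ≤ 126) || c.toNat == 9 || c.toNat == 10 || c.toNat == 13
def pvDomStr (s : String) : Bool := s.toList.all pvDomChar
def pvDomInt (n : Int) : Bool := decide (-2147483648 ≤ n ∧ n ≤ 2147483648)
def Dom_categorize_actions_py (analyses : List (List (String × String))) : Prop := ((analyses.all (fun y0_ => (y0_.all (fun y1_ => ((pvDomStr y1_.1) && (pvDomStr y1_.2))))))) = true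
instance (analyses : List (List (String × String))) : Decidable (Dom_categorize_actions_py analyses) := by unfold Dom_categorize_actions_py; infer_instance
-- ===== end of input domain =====

-- B replaces A's single dispatch pass over analyses with an outer loop over the seven fixed
-- categories, filtering the analyses once per category (alternative decomposition, same cost class).


-- ===== PORT A =====
-- analysis.get("action", "HOLD") / analysis.get("ticker", "Unknown") on the assoc-list dict
def pvActionOf (a : List (String × String)) : String := (PySem.Dict.mk a).getD "action" "HOLD"
def pvTickerOf (a : List (String × String)) : String := (PySem.Dict.mk a).getD "ticker" "Unknown"

-- the literal `categories` dict A starts from (seven keys, REBALANCE excluded)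
def pvInitCats : List (String × List String) :=
  [("HOLD", []), ("ADD_MORE", []), ("BOOK_PARTIAL_25", []), ("BOOK_PARTIAL_50", []),
   ("BOOK_ALL", []), ("STOP_LOSS_HIT", []), ("TRAILING_STOP", [])]

-- one iteration of A's `for analysis in analyses` loop
def pvStepA (d : PySem.Dict String (List String)) (a : List (String × String)) :
    PySem.Dict String (List String) :=
  let action := pvActionOf a
  let ticker := pvTickerOf a
  if d.contains action then d.modify action [] (fun l => l ++ [ticker]) else d

def categorize_actions_py (analyses : List (List (String × String))) : List (String × List String) :=
  (analyses.foldl pvStepA (PySem.Dict.mk pvInitCats)).items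

-- ===== PORT B =====
def pvCatKeys : List String :=
  ["HOLD", "ADD_MORE", "BOOK_PARTIAL_25", "BOOK_PARTIAL_50", "BOOK_ALL", "STOP_LOSS_HIT", "TRAILING_STOP"]

def categorize_actions_py_alt (analyses : List (List (String × String))) : List (String × List String) :=
  pvCatKeys.map (fun cat =>
    (cat, analyses.filterMap (fun a =>
      if pvActionOf a = cat then some (pvTickerOf a) else none)))

-- ===== PRECONDITION & SPEC =====
def Spec_categorize_actions_py (analyses : List (List (String × String))) (out : List (String × List String)) : Prop := out = categorize_actions_py_alt analyses
instance (analyses : List (List (String × String))) (out : List (String × List String)) : Decidable (Spec_categorize_actions_py analyses out) := by unfold Spec_categorize_actions_py; infer_instance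

-- ===== CLAIM (what is proved, stated in full; the proofs are below) =====
def Claim_equal_categorize_actions_py : Prop := ∀ (analyses : List (List (String × String))), Dom_categorize_actions_py analyses → Spec_categorize_actions_py analyses (categorize_actions_py analyses)

-- ===== LEMMAS AND PROOFS =====

-- membership in the bucket dict's keys is membership in pvCatKeys
lemma pv_contains_map (cats : List String) (g : String → List String) (k : String) :
    (PySem.Dict.mk (cats.map fun c => (c, g c))).contains k = true ↔ k ∈ cats := by
  simp only [PySem.Dict.contains, List.any_map, Function.comp, List.any_eq_true, beq_iff_eq]
  exact ⟨fun ⟨c, hc, he⟩ => he ▸ hc, fun h => ⟨k, h, rfl⟩⟩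

-- looking up a present key in the bucket dict
lemma pv_getD_map_mem (cats : List String) (g : String → List String) (k : String) (dflt : List String)
    (h : k ∈ cats) :
    (PySem.Dict.mk (cats.map fun c => (c, g c))).getD k dflt = g k := by
  induction cats with
  | nil => cases h
  | cons c cs ih =>
    by_cases hck : c = k
    · subst hck
      simp [PySem.Dict.getD, PySem.Dict.get?, List.find?]
    · rcases List.mem_cons.mp h with h | h
      · exact absurd h.symm hck
      · simpa [PySem.Dict.getD, PySem.Dict.get?, List.find?, hck] using ih h

-- inserting at a present key rewrites exactly the matching buckets
lemma pv_insert_map (cats : List String) (g : String → List String) (k : String) (v : List String)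
    (h : k ∈ cats) :
    (PySem.Dict.mk (cats.map fun c => (c, g c))).insert k v
      = PySem.Dict.mk (cats.map fun c => (c, if c = k then v else g c)) := by
  have hc : (PySem.Dict.mk (cats.map fun c => (c, g c))).contains k = true :=
    (pv_contains_map cats g k).mpr h
  simp only [PySem.Dict.insert, hc, if_pos]
  congr 1
  simp only [List.map_map]
  apply List.map_congr_left
  intro c _
  by_cases hck : c = k
  · subst hck; simp
  · simp [hck]

-- loop invariant: folding A's step over l extends each bucket by B's per-category filter of l
lemma pv_fold_invariant (l : List (List (String × String))) :
    ∀ g : String → List String,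
      l.foldl pvStepA (PySem.Dict.mk (pvCatKeys.map fun c => (c, g c)))
        = PySem.Dict.mk (pvCatKeys.map fun c =>
            (c, g c ++ l.filterMap (fun a =>
                  if pvActionOf a = c then some (pvTickerOf a) else none))) := by
  induction l with
  | nil => intro g; simp
  | cons a l ih =>
    intro g
    by_cases hmem : pvActionOf a ∈ pvCatKeys
    · have hc : (PySem.Dict.mk (pvCatKeys.map fun c => (c, g c))).contains (pvActionOf a) = true := by
        simp [pv_contains_map, hmem]
      have hstep : pvStepA (PySem.Dict.mk (pvCatKeys.map fun c => (c, g c))) a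
          = PySem.Dict.mk (pvCatKeys.map fun c =>
              (c, g c ++ if pvActionOf a = c then [pvTickerOf a] else [])) := by
        simp only [pvStepA, hc, if_pos, PySem.Dict.modify,
          pv_getD_map_mem pvCatKeys g (pvActionOf a) [] hmem,
          pv_insert_map pvCatKeys g (pvActionOf a) (g (pvActionOf a) ++ [pvTickerOf a]) hmem]
        congr 1
        apply List.map_congr_left
        intro c _
        by_cases hck : c = pvActionOf a
        · subst hck; simp
        · have hck' : pvActionOf a ≠ c := fun h => hck h.symm
          simp [hck, hck']
      rw [List.foldl_cons, hstep,
        ih (fun c => g c ++ if pvActionOf a = c then [pvTickerOf a] else [])]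
      congr 1
      apply List.map_congr_left
      intro c _
      by_cases hck : pvActionOf a = c
      · simp [List.filterMap_cons, hck]
      · simp [List.filterMap_cons, hck]
    · have hc : ¬ ((PySem.Dict.mk (pvCatKeys.map fun c => (c, g c))).contains (pvActionOf a) = true) :=
        fun h => hmem ((pv_contains_map pvCatKeys g (pvActionOf a)).mp h)
      rw [List.foldl_cons]
      have hstep : pvStepA (PySem.Dict.mk (pvCatKeys.map fun c => (c, g c))) a
          = PySem.Dict.mk (pvCatKeys.map fun c => (c, g c)) := by
        simp [pvStepA, hc]
      rw [hstep, ih g]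
      congr 1
      apply List.map_congr_left
      intro c hcmem
      have : pvActionOf a ≠ c := fun h => hmem (h ▸ hcmem)
      simp [List.filterMap_cons, this]

-- ===== VERDICT (by name: the statement is the Claim_ definition above) =====
theorem categorize_actions_py_spec : Claim_equal_categorize_actions_py := by
  intro analyses _
  have hinit : pvInitCats = pvCatKeys.map (fun c => (c, ([] : List String))) := by decide
  unfold Spec_categorize_actions_py categorize_actions_py categorize_actions_py_alt
  rw [hinit, pv_fold_invariant analyses (fun _ => [])]
  simp
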